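-- pv_equiv track=rewrite | github.com/akretion/sped-extractor | spedextractor/build_csv.py | _get_usable_csv_header
-- ===== SOURCE A (Python) =====
-- def _sort_header_order(key):
--     """Reorder hearder's keys"""
--     header_base = [
--         "register",
--         "index",
--         "block",
--         "code",
--         "type",
--         "required",
--         "in_required",
--         "out_required",
--         "values",
--         "rules",
--     ]
--     if key == "desc":
--         return 99
--     elif key.startswith("spec_"):
--         return 90
--     elif key.startswith("conditional_"):
--         return 10
--     elif key in header_base:
--         return header_base.index(key)
--     else:
--         return 50
--
-- def _get_usable_csv_header(fields):
--     """Return a list of all the different keys available in fields"""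
--     header = []
--     for field in fields:
--         for key in field.keys():
--             if key not in header:
--                 header.append(key)
--     header.sort(key=_sort_header_order)
--     return header
-- ===== SOURCE B (Python) =====
-- def _get_usable_csv_header(fields):
--     """Return a list of all the different keys available in fields"""
--     header_base = [
--         "register",
--         "index",
--         "block",
--         "code",
--         "type",
--         "required",
--         "in_required",
--         "out_required",
--         "values",
--         "rules",
--     ]
--     seen = set()
--     buckets = {}
--     for field in fields:
--         for key in field.keys():
--             if key in seen:
--                 continue
--             seen.add(key)
--             if key == "desc":
--                 rank = 99
--             elif key.startswith("spec_"):
--                 rank = 90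
--             elif key.startswith("conditional_"):
--                 rank = 10
--             elif key in header_base:
--                 rank = header_base.index(key)
--             else:
--                 rank = 50
--             buckets.setdefault(rank, []).append(key)
--     out = []
--     for rank in list(range(10)) + [10, 50, 90, 99]:
--         out.extend(buckets.get(rank, []))
--     return out
-- ===== Notes on version B (the rewrite author's own statement) =====
-- stated objective: alternative
-- what changed: Replaces build-list-with-membership-scan-then-comparison-sort by a single pass that dedups via a set and drops each new key into a bucket keyed by its priority rank, then concatenates the buckets in the fixed ascending rank order (a bucket sort over the known finite rank set).
import Mathlib
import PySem

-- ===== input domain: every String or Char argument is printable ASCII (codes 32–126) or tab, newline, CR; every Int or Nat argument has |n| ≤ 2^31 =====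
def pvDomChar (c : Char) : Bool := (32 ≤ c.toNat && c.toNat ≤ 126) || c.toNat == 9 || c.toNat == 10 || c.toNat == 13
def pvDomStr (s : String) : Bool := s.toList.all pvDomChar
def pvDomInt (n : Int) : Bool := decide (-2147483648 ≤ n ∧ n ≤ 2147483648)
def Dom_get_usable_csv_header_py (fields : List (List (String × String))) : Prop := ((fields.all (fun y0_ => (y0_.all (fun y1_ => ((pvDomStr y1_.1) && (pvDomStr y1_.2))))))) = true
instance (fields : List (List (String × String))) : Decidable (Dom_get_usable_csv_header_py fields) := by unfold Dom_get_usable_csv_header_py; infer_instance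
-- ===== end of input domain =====

-- B replaces A's membership-scan dedup followed by a comparison sort with a single pass
-- (set dedup + rank buckets) concatenated in fixed ascending rank order (a bucket sort);
-- objective: alternative algorithm. A's in-place .sort() mutation is not modelled; the
-- equivalence is about the return value.


-- ===== PORT A =====
-- the header_base literal of _sort_header_order (shared constant)
def pvHeaderBase : List String :=
  ["register", "index", "block", "code", "type", "required",
   "in_required", "out_required", "values", "rules"]

-- transliteration of _sort_header_order; the 'key in header_base' guard makes .index total,
-- so the .getD 0 default is never used
def sortHeaderOrder (key : String) : Int :=
  if key == "desc" then 99
  else if PySem.Str.startswith key "spec_" then 90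
  else if PySem.Str.startswith key "conditional_" then 10
  else if pvHeaderBase.contains key then (((PySem.List.index? pvHeaderBase key).getD 0 : Nat) : Int)
  else 50

def get_usable_csv_header_py (fields : List (List (String × String))) : List String :=
  PySem.List.sorted
    (fields.foldl
      (fun header field =>
        ((PySem.Dict.mk field).keys).foldl
          (fun header key => if header.contains key then header else header ++ [key])
          header)
      [])
    sortHeaderOrder

-- ===== PORT B =====
-- one step of B's single pass: skip seen keys, otherwise record the key in its rank bucket
def pvStepB (st : PySem.Set String × PySem.Dict Int (List String)) (key : String) :
    PySem.Set String × PySem.Dict Int (List String) :=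
  if st.1.contains key then st
  else
    let rank : Int :=
      if key == "desc" then 99
      else if PySem.Str.startswith key "spec_" then 90
      else if PySem.Str.startswith key "conditional_" then 10
      else if pvHeaderBase.contains key then (((PySem.List.index? pvHeaderBase key).getD 0 : Nat) : Int)
      else 50
    (st.1.add key, st.2.insert rank (st.2.getD rank [] ++ [key]))

def get_usable_csv_header_py_alt (fields : List (List (String × String))) : List String :=
  let st :=
    fields.foldl
      (fun st field => ((PySem.Dict.mk field).keys).foldl pvStepB st)
      (PySem.Set.empty, PySem.Dict.mk [])
  (PySem.List.pyRange 0 10 ++ [10, 50, 90, 99]).foldl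
    (fun out rank => out ++ st.2.getD rank []) []

-- ===== PRECONDITION & SPEC =====
def Spec_get_usable_csv_header_py (fields : List (List (String × String))) (out : List String) : Prop := out = get_usable_csv_header_py_alt fields
instance (fields : List (List (String × String))) (out : List String) : Decidable (Spec_get_usable_csv_header_py fields out) := by unfold Spec_get_usable_csv_header_py; infer_instance

-- ===== CLAIM (what is proved, stated in full; the proofs are below) =====
def Claim_equal_get_usable_csv_header_py : Prop := ∀ (fields : List (List (String × String))), Dom_get_usable_csv_header_py fields → Spec_get_usable_csv_header_py fields (get_usable_csv_header_py fields)

-- ===== LEMMAS AND PROOFS =====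
-- the rank list B concatenates over, as a literal
def pvRanks : List Int := [0, 1, 2, 3, 4, 5, 6, 7, 8, 9, 10, 50, 90, 99]

theorem pvRanks_eq : (PySem.List.pyRange 0 10 ++ [10, 50, 90, 99] : List Int) = pvRanks := by decide

theorem rank_mem (key : String) : sortHeaderOrder key ∈ pvRanks := by
  unfold sortHeaderOrder
  split_ifs with h1 h2 h3 h4
  · decide
  · decide
  · decide
  · have hmem : key ∈ pvHeaderBase := by simpa using h4
    fin_cases hmem <;> decide
  · decide

theorem insertBy_all_before {α : Type} (bef : α → α → Bool) (x : α) (bs : List α)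
    (h : ∀ y ∈ bs, bef x y = true) : PySem.List.insertBy bef x bs = x :: bs := by
  cases bs with
  | nil => rfl
  | cons y ys => simp [PySem.List.insertBy, h y (by simp)]

theorem insertBy_append_not {α : Type} (bef : α → α → Bool) (x : α) (as bs : List α)
    (h : ∀ y ∈ as, bef x y = false) :
    PySem.List.insertBy bef x (as ++ bs) = as ++ PySem.List.insertBy bef x bs := by
  induction as with
  | nil => rfl
  | cons a as ih =>
    simp [PySem.List.insertBy, h a (by simp)]
    exact ih (fun y hy => h y (by simp [hy]))

theorem insert_into_buckets (k : String → Int) (x : String) (F : Int → List String) :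
    ∀ rs : List Int, rs.Pairwise (· < ·) → (∀ r ∈ rs, ∀ y ∈ F r, k y = r) → k x ∈ rs →
    PySem.List.insertBy (fun a b => decide (k a < k b)) x (rs.flatMap F)
      = rs.flatMap (fun r => F r ++ if k x == r then [x] else []) := by
  intro rs
  induction rs with
  | nil => intro _ _ hx; simp at hx
  | cons r rs ih =>
    intro hp hF hx
    have hlt : ∀ r' ∈ rs, r < r' := (List.pairwise_cons.mp hp).1
    by_cases hxr : k x = r
    · have hrest : ∀ y ∈ rs.flatMap F, (decide (k x < k y)) = true := by
        intro y hy
        rcases List.mem_flatMap.mp hy with ⟨r', hr', hyF⟩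
        have := hF r' (by simp [hr']) y hyF
        simp [this, hxr]
        exact hlt r' hr'
      have hFr : ∀ y ∈ F r, (decide (k x < k y)) = false := by
        intro y hy
        have := hF r (by simp) y hy
        simp [this, hxr]
      have hrs : rs.flatMap (fun r' => F r' ++ if k x == r' then [x] else [])
          = rs.flatMap F := by
        apply List.flatMap_congr
        intro r' hr'
        have h2 := hlt r' hr'
        have hne : (k x == r') = false := by simp [hxr]; omega
        simp [hne]
      rw [List.flatMap_cons, insertBy_append_not _ _ _ _ hFr,
        insertBy_all_before _ _ _ hrest, List.flatMap_cons, hrs]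
      simp [hxr]
    · have hx' : k x ∈ rs := by
        rcases hx with _ | h
        · exact absurd rfl hxr
        · assumption
      have hrx : r < k x := hlt _ hx'
      have hFr : ∀ y ∈ F r, (decide (k x < k y)) = false := by
        intro y hy
        have := hF r (by simp) y hy
        simp [this]
        omega
      rw [List.flatMap_cons, insertBy_append_not _ _ _ _ hFr,
        ih (List.pairwise_cons.mp hp).2 (fun r' hr' => hF r' (by simp [hr'])) hx',
        List.flatMap_cons]
      have hne : (k x == r) = false := by simp [hxr]
      simp [hne]

theorem sorted_eq_buckets (k : String → Int) :
    ∀ (H : List String) (rs : List Int), rs.Pairwise (· < ·) → (∀ x ∈ H, k x ∈ rs) →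
    PySem.List.sorted H k = rs.flatMap (fun r => H.filter (fun y => k y == r)) := by
  intro H
  induction H using List.reverseRecOn with
  | nil => intro rs _ _; simp [PySem.List.sorted_eq_foldl_insertBy]
  | append_singleton as x ih =>
    intro rs hp hmem
    rw [PySem.List.sorted_eq_foldl_insertBy, List.foldl_append, List.foldl_cons, List.foldl_nil,
      ← PySem.List.sorted_eq_foldl_insertBy,
      ih rs hp (fun y hy => hmem y (by simp [hy]))]
    rw [insert_into_buckets k x _ rs hp
      (fun r _ y hy => by simpa using (List.mem_filter.mp hy).2) (hmem x (by simp))]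
    congr 1
    funext r
    simp only [List.filter_append, List.filter]
    by_cases h : k x = r
    · simp [h]
    · have hb : (k x == r) = false := by simpa using h
      simp [hb]

theorem add_ofList (q : List String) (x : String) :
    PySem.Set.add (PySem.Set.ofList q) x = PySem.Set.ofList (q ++ [x]) := by
  simp [PySem.Set.ofList, List.foldl_append]

theorem pass_inv : ∀ (ks q : List String) (d : PySem.Dict Int (List String)),
    (∀ r : Int, d.getD r [] = (PySem.Set.ofList q).filter (fun y => sortHeaderOrder y == r)) →
    ∀ r : Int, (ks.foldl pvStepB (PySem.Set.ofList q, d)).2.getD r []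
      = (PySem.Set.ofList (q ++ ks)).filter (fun y => sortHeaderOrder y == r) := by
  intro ks
  induction ks with
  | nil => intro q d hd r; simpa using hd r
  | cons key ks ih =>
    intro q d hd r
    rw [List.foldl_cons]
    by_cases hc : (PySem.Set.ofList q).contains key = true
    · have hadd : PySem.Set.ofList (q ++ [key]) = PySem.Set.ofList q := by
        rw [← add_ofList]; simp only [PySem.Set.add]; rw [if_pos hc]
      have hstep : pvStepB (PySem.Set.ofList q, d) key = (PySem.Set.ofList q, d) := by
        simp only [pvStepB]; rw [if_pos hc]
      rw [hstep]
      have hih := ih (q ++ [key]) d (fun r' => by rw [hadd]; exact hd r') r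
      rw [hadd] at hih
      simpa [List.append_assoc] using hih
    · have hadd : PySem.Set.ofList (q ++ [key]) = PySem.Set.ofList q ++ [key] := by
        rw [← add_ofList]; simp only [PySem.Set.add]; rw [if_neg hc]
      have hstep : pvStepB (PySem.Set.ofList q, d) key
          = (PySem.Set.ofList (q ++ [key]),
             d.insert (sortHeaderOrder key) (d.getD (sortHeaderOrder key) [] ++ [key])) := by
        simp only [pvStepB, sortHeaderOrder]; rw [if_neg hc, add_ofList]
      have hd' : ∀ r' : Int,
          (d.insert (sortHeaderOrder key) (d.getD (sortHeaderOrder key) [] ++ [key])).getD r' []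
            = (PySem.Set.ofList (q ++ [key])).filter (fun y => sortHeaderOrder y == r') := by
        intro r'
        rw [PySem.Dict.getD_insert, hadd, List.filter_append]
        by_cases hr : r' = sortHeaderOrder key
        · simp [hr, hd, List.filter]
        · have hne : (sortHeaderOrder key == r') = false := by
            simp [Ne.symm hr]
          simp [hr, hd, List.filter, hne]
      rw [hstep]
      have hih := ih (q ++ [key])
        (d.insert (sortHeaderOrder key) (d.getD (sortHeaderOrder key) [] ++ [key])) hd' r
      simpa [List.append_assoc] using hih

theorem nested_foldl {γ : Type} (g : γ → String → γ) (fields : List (List (String × String)))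
    (init : γ) :
    fields.foldl (fun acc field => ((PySem.Dict.mk field).keys).foldl g acc) init
      = (fields.flatMap (fun field => (PySem.Dict.mk field).keys)).foldl g init := by
  rw [List.foldl_flatMap]

-- ===== VERDICT (by name: the statement is the Claim_ definition above) =====
theorem get_usable_csv_header_py_spec : Claim_equal_get_usable_csv_header_py := by
  unfold Claim_equal_get_usable_csv_header_py
  intro fields _
  unfold Spec_get_usable_csv_header_py
  unfold get_usable_csv_header_py get_usable_csv_header_py_alt
  rw [nested_foldl, nested_foldl]
  set stream := fields.flatMap (fun field => (PySem.Dict.mk field).keys) with hstream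
  have hA : stream.foldl (fun header key => if header.contains key then header else header ++ [key]) []
      = PySem.Set.ofList stream := rfl
  rw [hA]
  rw [sorted_eq_buckets sortHeaderOrder (PySem.Set.ofList stream) pvRanks (by decide)
    (fun y _ => rank_mem y)]
  have hinv := pass_inv stream [] (PySem.Dict.mk [])
    (by intro r; simp [PySem.Dict.getD, PySem.Dict.get?, PySem.Set.ofList, PySem.Set.empty])
  rw [PySem.List.foldl_append_eq_flatMap, pvRanks_eq]
  simp only [List.nil_append]
  apply (List.flatMap_congr ?_).symm
  intro r hr
  have := hinv r
  simpa [PySem.Set.ofList, PySem.Set.empty] using this
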